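-- pv_equiv track=rewrite | github.com/sanjux-xx/YOYO | app.py | step2_group_variants
-- ===== SOURCE A (Python) =====
-- def step2_group_variants(products):
--     for p in products:
--         title = p.get("title", "").lower()
--
--         if "pro max" in title:
--             p["variant"] = "Pro Max"
--         elif "pro" in title and "pro max" not in title:
--             p["variant"] = "Pro"
--         elif "mini" in title:
--             p["variant"] = "Mini"
--         else:
--             p["variant"] = "Base"
--
--     return products
-- ===== SOURCE B (Python) =====
-- def step2_group_variants(products):
--     # staged passes: everyone starts as "Base", then each full pass over the list
--     # overwrites with a higher-priority variant where its keyword occurs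
--     for p in products:
--         p["variant"] = "Base"
--     for kw, label in (("mini", "Mini"), ("pro", "Pro"), ("pro max", "Pro Max")):
--         for p in products:
--             if kw in p.get("title", "").lower():
--                 p["variant"] = label
--     return products
-- ===== Notes on version B (the rewrite author's own statement) =====
-- stated objective: alternative
-- what changed: Replaces the per-product if/elif first-match chain by staged whole-list passes: one pass sets every variant to 'Base', then one full pass per rule in increasing priority (mini, pro, pro max) overwrites the variant wherever the keyword occurs, so the last write wins instead of the first match.
import Mathlib
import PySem

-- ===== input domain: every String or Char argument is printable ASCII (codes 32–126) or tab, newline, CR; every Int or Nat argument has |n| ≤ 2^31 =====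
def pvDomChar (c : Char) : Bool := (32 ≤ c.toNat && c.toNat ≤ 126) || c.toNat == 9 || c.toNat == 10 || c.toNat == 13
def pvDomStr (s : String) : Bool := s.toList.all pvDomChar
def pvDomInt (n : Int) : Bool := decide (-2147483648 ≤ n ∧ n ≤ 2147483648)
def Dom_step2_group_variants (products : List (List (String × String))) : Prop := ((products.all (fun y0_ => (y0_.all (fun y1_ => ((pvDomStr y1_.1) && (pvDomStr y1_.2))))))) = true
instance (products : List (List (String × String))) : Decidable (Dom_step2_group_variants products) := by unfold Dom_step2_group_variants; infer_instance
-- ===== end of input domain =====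

-- B replaces A's per-product if/elif chain by staged whole-list overwrite passes
-- (Base first, then mini, pro, pro max in increasing priority; last write wins) — 'alternative';
-- both Pythons mutate the input dicts in place, the equivalence proved is about the return value.

-- ===== PORT A =====
def step2_group_variants (products : List (List (String × String))) : List (List (String × String)) :=
  products.map (fun p =>
    let d := PySem.Dict.mk p
    let title := PySem.Str.lower (d.getD "title" "")
    if PySem.Str.isIn "pro max" title then (d.insert "variant" "Pro Max").items
    else if PySem.Str.isIn "pro" title && !(PySem.Str.isIn "pro max" title) then (d.insert "variant" "Pro").items
    else if PySem.Str.isIn "mini" title then (d.insert "variant" "Mini").items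
    else (d.insert "variant" "Base").items)

-- ===== PORT B =====
-- one overwrite pass over the whole list for one rule
def pvStage (kw label : String) (products : List (List (String × String))) : List (List (String × String)) :=
  products.map (fun p =>
    let d := PySem.Dict.mk p
    if PySem.Str.isIn kw (PySem.Str.lower (d.getD "title" "")) then (d.insert "variant" label).items
    else p)

def step2_group_variants_alt (products : List (List (String × String))) : List (List (String × String)) :=
  let base := products.map (fun p => ((PySem.Dict.mk p).insert "variant" "Base").items)
  [("mini", "Mini"), ("pro", "Pro"), ("pro max", "Pro Max")].foldl
    (fun acc r => pvStage r.1 r.2 acc) base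

-- ===== PRECONDITION & SPEC =====
def Spec_step2_group_variants (products : List (List (String × String))) (out : List (List (String × String))) : Prop := out = step2_group_variants_alt products
instance (products : List (List (String × String))) (out : List (List (String × String))) : Decidable (Spec_step2_group_variants products out) := by unfold Spec_step2_group_variants; infer_instance

-- ===== CLAIM =====
def Claim_equal_step2_group_variants : Prop := ∀ (products : List (List (String × String))), Dom_step2_group_variants products → Spec_step2_group_variants products (step2_group_variants products)

-- ===== LEMMAS AND PROOFS =====

-- inserting "variant" leaves the "title" lookup unchanged
theorem getD_title_insert_variant (d : PySem.Dict String String) (v : String) :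
    ((d.insert "variant" v).getD "title" "") = d.getD "title" "" :=
  PySem.Dict.getD_insert_of_ne d v "" (by decide)

-- A on a cons peels one element (definitional)
theorem a_cons (p : List (String × String)) (ps : List (List (String × String))) :
    step2_group_variants (p :: ps) =
      (let d := PySem.Dict.mk p
       let title := PySem.Str.lower (d.getD "title" "")
       if PySem.Str.isIn "pro max" title then (d.insert "variant" "Pro Max").items
       else if PySem.Str.isIn "pro" title && !(PySem.Str.isIn "pro max" title) then (d.insert "variant" "Pro").items
       else if PySem.Str.isIn "mini" title then (d.insert "variant" "Mini").items
       else (d.insert "variant" "Base").items) :: step2_group_variants ps := rfl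

-- B on a cons peels one element through all four passes (definitional)
theorem alt_cons (p : List (String × String)) (ps : List (List (String × String))) :
    step2_group_variants_alt (p :: ps) =
      ((fun q => let d := PySem.Dict.mk q
                 if PySem.Str.isIn "pro max" (PySem.Str.lower (d.getD "title" "")) then (d.insert "variant" "Pro Max").items else q)
       ((fun q => let d := PySem.Dict.mk q
                  if PySem.Str.isIn "pro" (PySem.Str.lower (d.getD "title" "")) then (d.insert "variant" "Pro").items else q)
        ((fun q => let d := PySem.Dict.mk q
                   if PySem.Str.isIn "mini" (PySem.Str.lower (d.getD "title" "")) then (d.insert "variant" "Mini").items else q)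
         (((PySem.Dict.mk p).insert "variant" "Base").items)))) :: step2_group_variants_alt ps := rfl

-- per product, A's if/elif chain equals B's three overwrite passes after the "Base" pass
theorem elem_eq (p : List (String × String)) :
    (let d := PySem.Dict.mk p
     let title := PySem.Str.lower (d.getD "title" "")
     if PySem.Str.isIn "pro max" title then (d.insert "variant" "Pro Max").items
     else if PySem.Str.isIn "pro" title && !(PySem.Str.isIn "pro max" title) then (d.insert "variant" "Pro").items
     else if PySem.Str.isIn "mini" title then (d.insert "variant" "Mini").items
     else (d.insert "variant" "Base").items)
    =
    (fun q => let d := PySem.Dict.mk q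
              if PySem.Str.isIn "pro max" (PySem.Str.lower (d.getD "title" "")) then (d.insert "variant" "Pro Max").items else q)
    ((fun q => let d := PySem.Dict.mk q
               if PySem.Str.isIn "pro" (PySem.Str.lower (d.getD "title" "")) then (d.insert "variant" "Pro").items else q)
     ((fun q => let d := PySem.Dict.mk q
                if PySem.Str.isIn "mini" (PySem.Str.lower (d.getD "title" "")) then (d.insert "variant" "Mini").items else q)
      (((PySem.Dict.mk p).insert "variant" "Base").items))) := by
  have hmk : ∀ x : String, PySem.Dict.mk (((PySem.Dict.mk p).insert "variant" x).items)
      = (PySem.Dict.mk p).insert "variant" x := fun _ => rfl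
  by_cases h1 : PySem.Str.isIn "pro max" (PySem.Str.lower ((PySem.Dict.mk p).getD "title" "")) = true <;>
  by_cases h2 : PySem.Str.isIn "pro" (PySem.Str.lower ((PySem.Dict.mk p).getD "title" "")) = true <;>
  by_cases h3 : PySem.Str.isIn "mini" (PySem.Str.lower ((PySem.Dict.mk p).getD "title" "")) = true <;>
  simp only [hmk, getD_title_insert_variant, PySem.Dict.insert_insert_self, h1, h2, h3,
    if_true, if_false, Bool.not_true, Bool.not_false, Bool.and_true, Bool.and_false,
    Bool.false_eq_true]

-- A = B on every list, by induction on the list of products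
theorem all_eq : ∀ (products : List (List (String × String))),
    step2_group_variants products = step2_group_variants_alt products
  | [] => rfl
  | p :: ps => by rw [a_cons, alt_cons, elem_eq p, all_eq ps]

-- ===== VERDICT =====
theorem step2_group_variants_spec : Claim_equal_step2_group_variants :=
  fun products _ => all_eq products
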